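-- pv_equiv track=rewrite | github.com/BorenaK/Library_Software | library_one.py | popGenres
-- ===== SOURCE A (Python) =====
-- def popGenres(sDictionary):
--     '''
--     Creates dicitonaries for the most popular genres and subgenres based on the sorted sDictionary from year 2019
--     returns: genres - the dictionary for the most popular genres
--              subgenres - dictionary for the most popular subgenres
--     '''
--     genres = []
--     subgenres = []
--
--     for key, value in sDictionary.items():
--         genres.append(value['Genre'])
--         subgenres.append(value['SubGenre'])
--
--     countDictionary = {}                             #genre dictionary
--     for element in genres:
--         if element not in countDictionary.keys():
--             countDictionary[element] = 1             #create key and assign on to the value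
--         else:
--             countDictionary[element] += 1            #adds 1 to the value if key is already there
--
--     countDictionarySub = {}                          #subgenre dictionary
--     for element in subgenres:
--         if element not in countDictionarySub.keys(): # works as above for genres
--             countDictionarySub[element] = 1
--         else:
--             countDictionarySub[element] += 1
--
--
--     return countDictionary, countDictionarySub
-- ===== SOURCE B (Python) =====
-- def popGenres(sDictionary):
--     # Single fused pass over the values: count genres and subgenres directly,
--     # without building the two intermediate lists.
--     genres = {}
--     subgenres = {}
--     for value in sDictionary.values():
--         g = value['Genre']
--         s = value['SubGenre']
--         genres[g] = genres.get(g, 0) + 1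
--         subgenres[s] = subgenres.get(s, 0) + 1
--     return genres, subgenres
-- ===== Notes on version B (the rewrite author's own statement) =====
-- stated objective: simpler
-- what changed: A's three passes (collect genre list, collect subgenre list, then a counting loop per list with a membership test) are fused into one pass over the values that increments two dicts via get(k,0)+1, eliminating both intermediate lists.
import Mathlib
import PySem

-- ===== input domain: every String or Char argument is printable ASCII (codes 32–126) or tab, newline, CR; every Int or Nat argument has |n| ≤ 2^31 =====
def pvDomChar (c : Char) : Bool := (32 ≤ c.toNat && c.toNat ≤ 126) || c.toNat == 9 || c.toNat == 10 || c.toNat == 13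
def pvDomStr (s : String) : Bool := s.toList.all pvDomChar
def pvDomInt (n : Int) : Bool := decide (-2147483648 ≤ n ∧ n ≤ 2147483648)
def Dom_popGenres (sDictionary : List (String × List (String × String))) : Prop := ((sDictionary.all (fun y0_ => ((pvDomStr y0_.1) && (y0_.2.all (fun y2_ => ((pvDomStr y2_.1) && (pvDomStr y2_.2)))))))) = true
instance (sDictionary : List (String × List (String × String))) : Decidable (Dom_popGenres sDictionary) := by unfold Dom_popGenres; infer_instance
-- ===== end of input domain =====

-- B fuses A's three passes (two list-building loops plus a counting loop each) into one
-- pass over the values that increments two dicts directly; objective: simpler.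


-- shared primitive: value['Genre'] / value['SubGenre'] — Python raises KeyError when the
-- key is absent; Pre_popGenres excludes exactly those inputs, so the "" default is never hit there
def pvVal (v : List (String × String)) (k : String) : String :=
  (PySem.Dict.ofList v).getD k ""

-- ===== PORT A =====
-- the two identical counting loops of A (membership test, then insert 1 or += 1)
def pvCount (xs : List String) : PySem.Dict String Int :=
  xs.foldl (fun d e =>
    if d.contains e = false then d.insert e 1 else d.modify e 0 (· + 1))
    PySem.Dict.empty

def popGenres (sDictionary : List (String × List (String × String))) : (List (String × Int)) × (List (String × Int)) :=
  let genres := sDictionary.foldl (fun acc kv => acc ++ [pvVal kv.2 "Genre"]) []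
  let subgenres := sDictionary.foldl (fun acc kv => acc ++ [pvVal kv.2 "SubGenre"]) []
  ((pvCount genres).items, (pvCount subgenres).items)

-- ===== PORT B =====
def popGenres_alt (sDictionary : List (String × List (String × String))) : (List (String × Int)) × (List (String × Int)) :=
  let p := sDictionary.foldl
    (fun (p : PySem.Dict String Int × PySem.Dict String Int) kv =>
      let g := pvVal kv.2 "Genre"
      let s := pvVal kv.2 "SubGenre"
      (p.1.insert g (p.1.getD g 0 + 1), p.2.insert s (p.2.getD s 0 + 1)))
    (PySem.Dict.empty, PySem.Dict.empty)
  (p.1.items, p.2.items)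

-- ===== PRECONDITION & SPEC =====
-- Pre_ excludes exactly the inputs where some value dict lacks 'Genre' or 'SubGenre',
-- on which the Python A raises KeyError.
def Pre_popGenres (sDictionary : List (String × List (String × String))) : Prop :=
  ∀ kv ∈ sDictionary, (PySem.Dict.ofList kv.2).contains "Genre" = true ∧
                      (PySem.Dict.ofList kv.2).contains "SubGenre" = true
instance (sDictionary : List (String × List (String × String))) : Decidable (Pre_popGenres sDictionary) := by unfold Pre_popGenres; infer_instance

def pvWitness_popGenres : (List (String × List (String × String))) :=
  [("b1", [("Genre", "Fiction"), ("SubGenre", "Crime")]),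
   ("b2", [("Genre", "Fiction"), ("SubGenre", "Fantasy")])]

def Spec_popGenres (sDictionary : List (String × List (String × String))) (out : (List (String × Int)) × (List (String × Int))) : Prop := out = popGenres_alt sDictionary
instance (sDictionary : List (String × List (String × String))) (out : (List (String × Int)) × (List (String × Int))) : Decidable (Spec_popGenres sDictionary out) := by unfold Spec_popGenres; infer_instance

-- ===== CLAIM (what is proved, stated in full; the proofs are below) =====
def Claim_equal_popGenres : Prop := ∀ (sDictionary : List (String × List (String × String))), Dom_popGenres sDictionary → Pre_popGenres sDictionary → Spec_popGenres sDictionary (popGenres sDictionary)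

-- ===== LEMMAS AND PROOFS =====

-- A's list-building loop is map
theorem foldl_append_singleton {α β : Type} (f : α → β) :
    ∀ (l : List α) (acc : List β),
      l.foldl (fun a kv => a ++ [f kv]) acc = acc ++ l.map f := by
  intro l
  induction l with
  | nil => simp
  | cons x xs ih => intro acc; simp [List.foldl_cons, ih]

-- A's counting step is the counter step
theorem stepA_eq_modify (d : PySem.Dict String Int) (x : String) :
    (if d.contains x = false then d.insert x 1 else d.modify x 0 (· + 1)) =
      d.modify x 0 (· + 1) := by
  by_cases h : d.contains x = false
  · simp [h, PySem.Dict.modify, PySem.Dict.getD_of_not_contains d 0 h]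
  · simp [h]

theorem pvCount_eq_counter (xs : List String) :
    pvCount xs = PySem.Dict.counter xs := by
  unfold pvCount
  rw [show (fun (d : PySem.Dict String Int) e =>
        if d.contains e = false then d.insert e 1 else d.modify e 0 (· + 1)) =
      (fun d e => d.modify e 0 (· + 1)) from funext fun d => funext fun e => stepA_eq_modify d e]
  rw [PySem.Dict.counter_eq_foldl]

-- B's fused pair fold splits into two independent folds
theorem foldl_pair_split {α β γ : Type} (f : β → α → β) (g : γ → α → γ) :
    ∀ (l : List α) (b : β) (c : γ),
      l.foldl (fun p kv => (f p.1 kv, g p.2 kv)) (b, c) = (l.foldl f b, l.foldl g c) := by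
  intro l
  induction l with
  | nil => simp
  | cons x xs ih => intro b c; simp [List.foldl_cons, ih]

-- B's per-dict fold over the pairs equals the counter of the extracted key list
theorem fused_eq_counter (key : String) (s : List (String × List (String × String))) :
    s.foldl (fun (d : PySem.Dict String Int) kv =>
        d.insert (pvVal kv.2 key) (d.getD (pvVal kv.2 key) 0 + 1)) PySem.Dict.empty
      = PySem.Dict.counter (s.map (fun kv => pvVal kv.2 key)) := by
  rw [← PySem.Dict.foldl_insert_getD_add_one_eq_counter, List.foldl_map]

-- ===== VERDICT (by name: the statement is the Claim_ definition above) =====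
theorem popGenres_spec : Claim_equal_popGenres := by
  intro s _ _
  show popGenres s = popGenres_alt s
  unfold popGenres popGenres_alt
  dsimp only
  rw [foldl_append_singleton (fun kv => pvVal kv.2 "Genre") s [],
      foldl_append_singleton (fun kv => pvVal kv.2 "SubGenre") s [],
      foldl_pair_split (fun (d : PySem.Dict String Int) kv => d.insert (pvVal kv.2 "Genre") (d.getD (pvVal kv.2 "Genre") 0 + 1))
        (fun (d : PySem.Dict String Int) kv => d.insert (pvVal kv.2 "SubGenre") (d.getD (pvVal kv.2 "SubGenre") 0 + 1))
        s PySem.Dict.empty PySem.Dict.empty,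
      pvCount_eq_counter, pvCount_eq_counter]
  dsimp only
  rw [List.nil_append, List.nil_append, fused_eq_counter "Genre" s, fused_eq_counter "SubGenre" s]
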